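-- pv_equiv track=rewrite | github.com/Pymmdrza/fastCrypter | encrypter/secure_compressor.py | _get_password_recommendations
-- ===== SOURCE A (Python) =====
-- def _get_password_recommendations(password: str) -> list:
--     """Get password improvement recommendations."""
--     recommendations = []
--
--     if len(password) < 8:
--         recommendations.append("Use at least 8 characters")
--     elif len(password) < 12:
--         recommendations.append("Consider using 12+ characters for better security")
--
--     if not any(c.isupper() for c in password):
--         recommendations.append("Add uppercase letters")
--
--     if not any(c.islower() for c in password):
--         recommendations.append("Add lowercase letters")
--
--     if not any(c.isdigit() for c in password):
--         recommendations.append("Add numbers")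
--
--     if not any(not c.isalnum() for c in password):
--         recommendations.append("Add special characters (!@#$%^&*)")
--
--     if not recommendations:
--         recommendations.append("Password strength is good!")
--
--     return recommendations
-- ===== SOURCE B (Python) =====
-- def _get_password_recommendations(password: str) -> list:
--     """One pass over the characters accumulating four flags, then a decision phase."""
--     has_upper = has_lower = has_digit = has_special = False
--     for c in password:
--         if c.isupper():
--             has_upper = True
--         if c.islower():
--             has_lower = True
--         if c.isdigit():
--             has_digit = True
--         if not c.isalnum():
--             has_special = True
--
--     n = len(password)
--     recommendations = []
--     if n < 8:
--         recommendations.append("Use at least 8 characters")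
--     elif n < 12:
--         recommendations.append("Consider using 12+ characters for better security")
--     for flag, msg in (
--         (has_upper, "Add uppercase letters"),
--         (has_lower, "Add lowercase letters"),
--         (has_digit, "Add numbers"),
--         (has_special, "Add special characters (!@#$%^&*)"),
--     ):
--         if not flag:
--             recommendations.append(msg)
--     return recommendations or ["Password strength is good!"]
-- ===== Notes on version B (the rewrite author's own statement) =====
-- stated objective: alternative
-- what changed: Replaced A's four independent any()-scans over the password with a single accumulating pass computing four flags, followed by a separate table-driven decision phase that emits the messages.
import Mathlib
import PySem

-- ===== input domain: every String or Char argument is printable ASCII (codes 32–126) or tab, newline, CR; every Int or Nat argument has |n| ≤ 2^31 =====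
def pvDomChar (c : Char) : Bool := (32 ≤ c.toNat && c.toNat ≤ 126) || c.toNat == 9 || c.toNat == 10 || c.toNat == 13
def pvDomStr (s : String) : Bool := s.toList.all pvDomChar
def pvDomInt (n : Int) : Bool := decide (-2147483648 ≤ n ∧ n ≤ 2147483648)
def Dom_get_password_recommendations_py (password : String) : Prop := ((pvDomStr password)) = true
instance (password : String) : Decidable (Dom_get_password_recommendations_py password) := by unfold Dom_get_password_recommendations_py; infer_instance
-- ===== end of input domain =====

-- B replaces A's four independent any() scans by one accumulating pass plus a
-- table-driven decision phase (objective: alternative decomposition, same result).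

-- ===== PORT A =====
def get_password_recommendations_py (password : String) : List String :=
  let cs := password.toList
  let recommendations : List String := []
  let recommendations :=
    if PySem.Str.len password < 8 then recommendations ++ ["Use at least 8 characters"]
    else if PySem.Str.len password < 12 then
      recommendations ++ ["Consider using 12+ characters for better security"]
    else recommendations
  let recommendations :=
    if cs.any PySem.Chars.isupper then recommendations
    else recommendations ++ ["Add uppercase letters"]
  let recommendations :=
    if cs.any PySem.Chars.islower then recommendations
    else recommendations ++ ["Add lowercase letters"]
  let recommendations :=
    if cs.any PySem.Chars.isdigit then recommendations
    else recommendations ++ ["Add numbers"]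
  let recommendations :=
    if cs.any (fun c => !PySem.Chars.isalnum c) then recommendations
    else recommendations ++ ["Add special characters (!@#$%^&*)"]
  if recommendations = [] then ["Password strength is good!"] else recommendations

-- ===== PORT B =====
-- single accumulating pass over the characters (Source B's for-loop)
def pvFlagStep (f : Bool × Bool × Bool × Bool) (c : Char) : Bool × Bool × Bool × Bool :=
  (f.1 || PySem.Chars.isupper c,
   f.2.1 || PySem.Chars.islower c,
   f.2.2.1 || PySem.Chars.isdigit c,
   f.2.2.2 || !PySem.Chars.isalnum c)

def get_password_recommendations_py_alt (password : String) : List String :=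
  let fl := password.toList.foldl pvFlagStep (false, false, false, false)
  let n := PySem.Str.len password
  let base : List String :=
    if n < 8 then ["Use at least 8 characters"]
    else if n < 12 then ["Consider using 12+ characters for better security"]
    else []
  let recs :=
    [(fl.1, "Add uppercase letters"),
     (fl.2.1, "Add lowercase letters"),
     (fl.2.2.1, "Add numbers"),
     (fl.2.2.2, "Add special characters (!@#$%^&*)")].foldl
      (fun acc p => if p.1 then acc else acc ++ [p.2]) base
  if recs = [] then ["Password strength is good!"] else recs

-- ===== PRECONDITION & SPEC =====
def Spec_get_password_recommendations_py (password : String) (out : List String) : Prop := out = get_password_recommendations_py_alt password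
instance (password : String) (out : List String) : Decidable (Spec_get_password_recommendations_py password out) := by unfold Spec_get_password_recommendations_py; infer_instance

-- ===== CLAIM (what is proved, stated in full; the proofs are below) =====
def Claim_equal_get_password_recommendations_py : Prop := ∀ (password : String), Dom_get_password_recommendations_py password → Spec_get_password_recommendations_py password (get_password_recommendations_py password)

-- ===== LEMMAS AND PROOFS =====
lemma pvFlags_eq (cs : List Char) (u l d s : Bool) :
    cs.foldl pvFlagStep (u, l, d, s) =
      (u || cs.any PySem.Chars.isupper,
       l || cs.any PySem.Chars.islower,
       d || cs.any PySem.Chars.isdigit,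
       s || cs.any (fun c => !PySem.Chars.isalnum c)) := by
  induction cs generalizing u l d s with
  | nil => simp
  | cons c cs ih =>
    simp only [List.foldl_cons, List.any_cons, pvFlagStep, ih]
    simp [Bool.or_assoc]

-- ===== VERDICT (by name: the statement is the Claim_ definition above) =====
theorem get_password_recommendations_py_spec : Claim_equal_get_password_recommendations_py := by
  intro password _
  show _ = _
  unfold get_password_recommendations_py get_password_recommendations_py_alt
  simp only [pvFlags_eq, Bool.false_or, List.foldl_cons, List.foldl_nil]
  rfl
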